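-- pv_equiv track=rewrite | github.com/longtomjr/project_euler | solutions/problem_001.py | multiples
-- ===== SOURCE A (Python) =====
-- def multiples(factor_list: list, maximum: int):
--     """
--     Returns a list of the multiples of the given factors
--
--     :param factor_list: A 'list' of the factors to get the multiples of
--     :param maximum: The maximum number that is used to look for multiples
--
--     :returns: Returns a 'list' of the multiples of the given factors
--     """
--
--     # Creates an empty list to later append to
--     multiples_list = []
--
--     # Loops over all the factors in the list
--     for factor in factor_list:
--         # loops over all the numbers from 1 to the maximum
--         for i in range(1, maximum):
--             # Checks if the factor can be divided "cleanly" and add it to the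
--             # list if it can.
--             if i % factor == 0:
--                 multiples_list.append(i)
--             # Continues if not a multiple (continues with the loop)
--             else:
--                 continue
--
--     # 'multiples_list' changed to a 'set' (removes duplicates) and back to a
--     # list
--     # Read here: https://docs.python.org/3/library/stdtypes.html#types-set
--
--     # Set is a collection like 'list', but unordered and can only have unique
--     # entries therefore no duplicate entries. Very handy to remove duplicates
--     return list(set(multiples_list))
-- ===== SOURCE B (Python) =====
-- def multiples(factor_list, maximum):
--     """Faster: enumerate each factor's multiples directly with a stepped range
--     instead of modulo-testing every number below the maximum."""
--     result = set()
--     for factor in factor_list: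
--         step = abs(factor)
--         result.update(range(step, maximum, step))
--     return list(result)
-- ===== Notes on version B (the rewrite author's own statement) =====
-- stated objective: faster
-- what changed: Instead of testing every i in range(1, maximum) against every factor with i % factor, B walks each factor's multiples directly via range(|factor|, maximum, |factor|) and accumulates them in a set as it goes.
-- outside the precondition, e.g. on multiples([0], 0): A returns [], B raises ValueError
import Mathlib
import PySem

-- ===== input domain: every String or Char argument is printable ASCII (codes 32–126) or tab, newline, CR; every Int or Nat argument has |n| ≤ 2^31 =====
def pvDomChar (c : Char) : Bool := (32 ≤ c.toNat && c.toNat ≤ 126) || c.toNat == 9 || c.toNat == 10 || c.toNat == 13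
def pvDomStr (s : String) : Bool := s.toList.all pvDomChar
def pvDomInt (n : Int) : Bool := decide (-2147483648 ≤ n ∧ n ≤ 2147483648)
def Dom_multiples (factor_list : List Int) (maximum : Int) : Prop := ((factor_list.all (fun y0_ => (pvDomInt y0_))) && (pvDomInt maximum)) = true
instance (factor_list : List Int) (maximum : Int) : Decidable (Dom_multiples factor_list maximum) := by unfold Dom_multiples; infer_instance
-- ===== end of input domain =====

-- B replaces A's per-number modulo test with direct stepped ranges of each factor's multiples (measurably faster); return values proved equal.


-- ===== PORT A =====
def multiples (factor_list : List Int) (maximum : Int) : List Int :=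
  -- multiples_list: for factor in factor_list: for i in range(1, maximum): if i % factor == 0: append i
  -- return list(set(multiples_list))
  PySem.Set.ofList
    (factor_list.foldl (fun acc factor =>
      (PySem.List.pyRange 1 maximum 1).foldl (fun acc2 i =>
        if PySem.Int.mod i factor == 0 then acc2 ++ [i] else acc2) acc) [])

-- ===== PORT B =====
def multiples_alt (factor_list : List Int) (maximum : Int) : List Int :=
  -- result = set(); for factor: result.update(range(abs(factor), maximum, abs(factor))); return list(result)
  factor_list.foldl (fun result factor =>
    PySem.Set.update result
      (PySem.List.pyRange ((factor.natAbs : Int)) maximum ((factor.natAbs : Int))))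
    PySem.Set.empty

-- ===== PRECONDITION & SPEC =====
-- Pre_ excludes factor lists containing 0: there A raises ZeroDivisionError whenever maximum ≥ 2,
-- and B's range(0, maximum, 0) raises ValueError even when maximum < 2 (where A returns []).
def Pre_multiples (factor_list : List Int) (maximum : Int) : Prop := (0 : Int) ∉ factor_list
instance (factor_list : List Int) (maximum : Int) : Decidable (Pre_multiples factor_list maximum) := by unfold Pre_multiples; infer_instance
def pvWitness_multiples : List Int × Int := ([3, 5], 10)

def Spec_multiples (factor_list : List Int) (maximum : Int) (out : List Int) : Prop := out = multiples_alt factor_list maximum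
instance (factor_list : List Int) (maximum : Int) (out : List Int) : Decidable (Spec_multiples factor_list maximum out) := by unfold Spec_multiples; infer_instance

-- ===== CLAIM (what is proved, stated in full; the proofs are below) =====
def Claim_equal_multiples : Prop := ∀ (factor_list : List Int) (maximum : Int), Dom_multiples factor_list maximum → Pre_multiples factor_list maximum → Spec_multiples factor_list maximum (multiples factor_list maximum)

-- ===== LEMMAS AND PROOFS =====

-- two strictly increasing integer lists with the same members are equal
lemma eq_of_pairwise_lt_of_mem_iff (xs ys : List Int)
    (hx : xs.Pairwise (· < ·)) (hy : ys.Pairwise (· < ·))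
    (h : ∀ z, z ∈ xs ↔ z ∈ ys) : xs = ys := by
  have hnx : xs.Nodup := hx.imp ne_of_lt
  have hny : ys.Nodup := hy.imp ne_of_lt
  have hperm : ys.Perm xs := by
    refine (List.perm_of_nodup_nodup_toFinset_eq hny hnx ?_).symm.symm
    ext z
    simp [List.mem_toFinset, h z]
  have h1 : PySem.List.sorted xs (fun x => x) = xs :=
    PySem.List.sorted_eq_of_perm_of_pairwise_lt xs xs (fun x => x) (List.Perm.refl xs) hx
  have h2 : PySem.List.sorted xs (fun x => x) = ys :=
    PySem.List.sorted_eq_of_perm_of_pairwise_lt xs ys (fun x => x) hperm hy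
  rw [← h1, h2]

-- the filtered 1..maximum-1 scan of A equals the stepped range of B, for a nonzero factor
lemma filter_range_eq_stepped (f maximum : Int) (hf : f ≠ 0) :
    (PySem.List.pyRange 1 maximum 1).filter (fun i => PySem.Int.mod i f == 0)
      = PySem.List.pyRange ((f.natAbs : Int)) maximum ((f.natAbs : Int)) := by
  set s : Int := (f.natAbs : Int) with hs_def
  have hs : 0 < s := by
    have : f.natAbs ≠ 0 := Int.natAbs_ne_zero.mpr hf
    omega
  apply eq_of_pairwise_lt_of_mem_iff
  · exact (PySem.List.pairwise_lt_pyRange_one 1 maximum).filter _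
  · rw [PySem.List.pyRange_of_pos _ _ hs]
    rw [List.pairwise_map]
    refine (List.pairwise_lt_range).imp ?_
    intro a b hab
    have : s * (a : Int) < s * (b : Int) := by
      apply mul_lt_mul_of_pos_left _ hs
      exact_mod_cast hab
    linarith
  · intro z
    rw [List.mem_filter, PySem.List.mem_pyRange_one, PySem.List.mem_pyRange_iff_of_pos hs]
    have hdvd : (PySem.Int.mod z f == 0) = true ↔ s ∣ z := by
      rw [beq_iff_eq, PySem.Int.mod_eq_zero_iff_dvd]
      exact (Int.natAbs_dvd).symm
    rw [hdvd]
    constructor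
    · rintro ⟨⟨h1, h2⟩, h3⟩
      have hle : s ≤ z := Int.le_of_dvd (by omega) h3
      exact ⟨hle, h2, (dvd_sub_right h3).mpr dvd_rfl⟩
    · rintro ⟨h1, h2, h3⟩
      have h4 : s ∣ z := by
        have := dvd_add h3 (dvd_refl s)
        simpa using this
      exact ⟨⟨by omega, h2⟩, h4⟩

-- A's accumulator as a flatMap of per-factor filters
lemma portA_eq_ofList_flatMap (factor_list : List Int) (maximum : Int) :
    multiples factor_list maximum
      = PySem.Set.ofList (factor_list.flatMap
          (fun factor => (PySem.List.pyRange 1 maximum 1).filter (fun i => PySem.Int.mod i factor == 0))) := by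
  unfold multiples
  congr 1
  have hcongr := PySem.List.foldl_congr_mem factor_list
      (fun acc factor => (PySem.List.pyRange 1 maximum 1).foldl (fun acc2 i =>
        if PySem.Int.mod i factor == 0 then acc2 ++ [i] else acc2) acc)
      (fun acc factor => acc ++ (PySem.List.pyRange 1 maximum 1).filter (fun i => PySem.Int.mod i factor == 0))
      []
      (by intro acc x _; exact PySem.List.foldl_append_if_eq_filter _ _ _)
  rw [hcongr]
  simpa using PySem.List.foldl_append_eq_flatMap
    (fun factor => (PySem.List.pyRange 1 maximum 1).filter (fun i => PySem.Int.mod i factor == 0)) factor_list []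

-- folding set-updates of per-factor lists builds the set of the concatenation
lemma foldl_update_eq_ofList_flatMap (g : Int → List Int) :
    ∀ (fl : List Int) (acc : List Int),
      fl.foldl (fun s f => PySem.Set.update s (g f)) (PySem.Set.ofList acc)
        = PySem.Set.ofList (acc ++ fl.flatMap g) := by
  intro fl
  induction fl with
  | nil => intro acc; simp
  | cons f fl ih =>
    intro acc
    have hstep : PySem.Set.update (PySem.Set.ofList acc) (g f) = PySem.Set.ofList (acc ++ g f) := by
      simp [PySem.Set.update, PySem.Set.ofList_eq_foldl, List.foldl_append]
    simp only [List.foldl_cons, hstep, ih (acc ++ g f), List.flatMap_cons, List.append_assoc]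

-- ===== VERDICT (by name: the statement is the Claim_ definition above) =====
theorem multiples_spec : Claim_equal_multiples := by
  intro factor_list maximum _ hpre
  unfold Spec_multiples
  rw [portA_eq_ofList_flatMap]
  unfold multiples_alt
  have hcongr := PySem.List.foldl_congr_mem factor_list
      (fun result factor => PySem.Set.update result
        (PySem.List.pyRange ((factor.natAbs : Int)) maximum ((factor.natAbs : Int))))
      (fun s factor => PySem.Set.update s
        ((PySem.List.pyRange 1 maximum 1).filter (fun i => PySem.Int.mod i factor == 0)))
      PySem.Set.empty
      (by
        intro acc x hx
        dsimp only
        rw [filter_range_eq_stepped x maximum (by intro h0; exact hpre (h0 ▸ hx))])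
  rw [hcongr]
  have := foldl_update_eq_ofList_flatMap
    (fun factor => (PySem.List.pyRange 1 maximum 1).filter (fun i => PySem.Int.mod i factor == 0))
    factor_list []
  simpa [PySem.Set.empty] using this.symm
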